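-- pv_equiv track=rewrite | github.com/filipedwan/CodeBench-Features-Extractor | Legacy extractor/tabelas_por_questao/por_questão_notas.py | session
-- ===== SOURCE A (Python) =====
-- def session(grades,lista,turma):
-- 	aux1=[]
-- 	for l in lista:
-- 		cont=0
-- 		aux=len(l)-5
-- 		while(cont<len(grades)):
-- 			if(l[:aux]==grades[cont][:aux]):
-- 				aux1=aux1+[grades[cont]]
-- 			cont+=1
-- 	return aux1
-- ===== SOURCE B (Python) =====
-- def session(grades, lista, turma):
--     # Group grades once per distinct prefix length, then answer each query by one dict lookup.
--     cache = {}
--     out = []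
--     for l in lista:
--         aux = len(l) - 5
--         if aux not in cache:
--             groups = {}
--             for g in grades:
--                 groups.setdefault(g[:aux], []).append(g)
--             cache[aux] = groups
--         out.extend(cache[aux].get(l[:aux], []))
--     return out
-- ===== Notes on version B (the rewrite author's own statement) =====
-- stated objective: faster
-- what changed: B groups the grades once per distinct prefix length into a dict keyed by prefix and answers each query by a single lookup, instead of A's full scan of grades for every query.
import Mathlib
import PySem

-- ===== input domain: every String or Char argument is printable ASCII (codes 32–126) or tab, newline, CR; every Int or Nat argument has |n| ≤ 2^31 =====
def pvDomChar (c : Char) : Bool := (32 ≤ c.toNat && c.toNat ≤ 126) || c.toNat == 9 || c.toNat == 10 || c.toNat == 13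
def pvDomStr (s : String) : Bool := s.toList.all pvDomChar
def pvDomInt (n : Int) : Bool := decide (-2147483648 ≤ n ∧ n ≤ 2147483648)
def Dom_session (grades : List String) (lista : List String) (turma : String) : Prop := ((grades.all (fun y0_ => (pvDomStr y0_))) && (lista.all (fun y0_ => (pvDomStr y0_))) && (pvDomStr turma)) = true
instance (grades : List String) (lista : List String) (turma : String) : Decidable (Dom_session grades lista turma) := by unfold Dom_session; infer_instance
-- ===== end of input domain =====

-- B groups the grades once per distinct prefix length into a dict keyed by prefix,
-- then answers each query by one lookup (faster in a timing run); A rescans grades per query.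

-- ===== PORT A =====
def session (grades : List String) (lista : List String) (turma : String) : List String :=
  lista.foldl (fun aux1 l =>
    let aux : Int := PySem.Str.len l - 5
    (PySem.List.pyRange 0 (PySem.List.len grades) 1).foldl (fun acc cont =>
      let g := PySem.List.pyGetD grades cont ""
      if PySem.Str.slice l none (some aux) == PySem.Str.slice g none (some aux)
      then acc ++ [g] else acc) aux1) []

-- ===== PORT B =====
-- g[:aux] as B computes it
def prefKey (aux : Int) (g : String) : String := PySem.Str.slice g none (some aux)

-- the inner grouping loop of B: groups.setdefault(g[:aux], []).append(g)
def buildGroups (grades : List String) (aux : Int) : PySem.Dict String (List String) :=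
  grades.foldl (fun d g => d.modify (prefKey aux g) [] (· ++ [g])) PySem.Dict.empty

def session_alt (grades : List String) (lista : List String) (turma : String) : List String :=
  (lista.foldl
    (fun (st : PySem.Dict Int (PySem.Dict String (List String)) × List String) l =>
      let aux : Int := PySem.Str.len l - 5
      let cache := if st.1.contains aux then st.1 else st.1.insert aux (buildGroups grades aux)
      (cache, st.2 ++ (cache.getD aux PySem.Dict.empty).getD (prefKey aux l) []))
    (PySem.Dict.empty, [])).2

-- ===== PRECONDITION & SPEC =====
def Spec_session (grades : List String) (lista : List String) (turma : String) (out : List String) : Prop := out = session_alt grades lista turma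
instance (grades : List String) (lista : List String) (turma : String) (out : List String) : Decidable (Spec_session grades lista turma out) := by unfold Spec_session; infer_instance

-- ===== CLAIM (what is proved, stated in full; the proofs are below) =====
def Claim_equal_session : Prop := ∀ (grades : List String) (lista : List String) (turma : String), Dom_session grades lista turma → Spec_session grades lista turma (session grades lista turma)

-- ===== LEMMAS AND PROOFS =====

-- A's inner while loop equals one filter pass over grades
theorem session_inner (grades : List String) (l : String) (aux : Int) (init : List String) :
    (PySem.List.pyRange 0 (PySem.List.len grades) 1).foldl (fun acc cont =>
      let g := PySem.List.pyGetD grades cont ""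
      if PySem.Str.slice l none (some aux) == PySem.Str.slice g none (some aux)
      then acc ++ [g] else acc) init
    = init ++ grades.filter (fun g => prefKey aux g == prefKey aux l) := by
  rw [show (PySem.List.len grades) = ((grades.length : Int)) from rfl]
  rw [PySem.List.foldl_pyRange_zero_pyGetD' grades ""
      (fun acc g => if PySem.Str.slice l none (some aux) == PySem.Str.slice g none (some aux)
        then acc ++ [g] else acc) init]
  induction grades generalizing init with
  | nil => simp
  | cons g gs ih =>
    rw [List.foldl_cons, ih]
    have hsym : (PySem.Str.slice l none (some aux) == PySem.Str.slice g none (some aux))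
        = (prefKey aux g == prefKey aux l) := by
      simp [prefKey, eq_comm]
    simp only [List.filter_cons, ← hsym]
    split_ifs with h
    · simp
    · rfl

-- B's grouping dict looked up at a prefix is exactly that filter pass
theorem buildGroups_getD (grades : List String) (aux : Int) (c : String) :
    (buildGroups grades aux).getD c [] = grades.filter (fun g => prefKey aux g == c) := by
  unfold buildGroups
  have hmap : ((grades.map (fun g => (prefKey aux g, g))).foldl
      (fun (d : PySem.Dict String (List String)) p => d.modify p.1 [] (· ++ [p.2])) PySem.Dict.empty)
      = grades.foldl (fun d g => d.modify (prefKey aux g) [] (· ++ [g])) PySem.Dict.empty := by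
    rw [List.foldl_map]
  rw [← hmap, PySem.Dict.getD_foldl_modify_append]
  simp [PySem.Dict.getD_empty, List.filter_map, Function.comp_def]

-- invariant: every cached dict is the grouping dict for its key
def CacheOK (grades : List String) (d : PySem.Dict Int (PySem.Dict String (List String))) : Prop :=
  ∀ a, d.contains a = true → d.getD a PySem.Dict.empty = buildGroups grades a

theorem session_alt_loop (grades : List String) (lista : List String)
    (d : PySem.Dict Int (PySem.Dict String (List String))) (acc : List String)
    (hd : CacheOK grades d) :
    (lista.foldl
      (fun (st : PySem.Dict Int (PySem.Dict String (List String)) × List String) l =>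
        let aux : Int := PySem.Str.len l - 5
        let cache := if st.1.contains aux then st.1 else st.1.insert aux (buildGroups grades aux)
        (cache, st.2 ++ (cache.getD aux PySem.Dict.empty).getD (prefKey aux l) []))
      (d, acc)).2
    = lista.foldl (fun acc l =>
        let aux : Int := PySem.Str.len l - 5
        acc ++ grades.filter (fun g => prefKey aux g == prefKey aux l)) acc := by
  induction lista generalizing d acc with
  | nil => rfl
  | cons l ls ih =>
    simp only [List.foldl_cons]
    set aux : Int := PySem.Str.len l - 5 with haux
    by_cases hc : d.contains aux = true
    · rw [if_pos hc]
      rw [ih d _ hd, hd aux hc, buildGroups_getD]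
    · rw [if_neg hc]
      have hd' : CacheOK grades (d.insert aux (buildGroups grades aux)) := by
        intro a ha
        rw [PySem.Dict.getD_insert]
        split_ifs with h
        · exact congrArg _ h.symm
        · refine hd a ?_
          rw [PySem.Dict.contains_insert] at ha
          simpa [h] using ha
      rw [ih _ _ hd', PySem.Dict.getD_insert_self, buildGroups_getD]

-- ===== VERDICT (by name: the statement is the Claim_ definition above) =====
theorem session_spec : Claim_equal_session := by
  intro grades lista turma _
  unfold Spec_session session session_alt
  rw [session_alt_loop grades lista PySem.Dict.empty [] (by
    intro a ha; simp [PySem.Dict.contains_empty] at ha)]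
  have key : ∀ (ls : List String) (init : List String),
      ls.foldl (fun aux1 l =>
        let aux : Int := PySem.Str.len l - 5
        (PySem.List.pyRange 0 (PySem.List.len grades) 1).foldl (fun acc cont =>
          let g := PySem.List.pyGetD grades cont ""
          if PySem.Str.slice l none (some aux) == PySem.Str.slice g none (some aux)
          then acc ++ [g] else acc) aux1) init
      = ls.foldl (fun acc l =>
          let aux : Int := PySem.Str.len l - 5
          acc ++ grades.filter (fun g => prefKey aux g == prefKey aux l)) init := by
    intro ls
    induction ls with
    | nil => intro init; rfl
    | cons l ls ih =>
      intro init
      simp only [List.foldl_cons]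
      rw [session_inner, ih]
  exact key lista []
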